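-- pv_equiv track=rewrite | github.com/tapiatellez/Comprehensibility | Comprensibilidad.py | get_paragraph_occurrences_weigth
-- ===== SOURCE A (Python) =====
-- def get_paragraph_occurrences_weigth(paragraphs_occurrences):
--     paragraphs_occurrences_weigth_dictionary = {}
--     for paragraph, concept_list in paragraphs_occurrences.items():
--         occurrence_weight_dictionary = {}
--         for occurrence in concept_list:
--             occurrence_weight_dictionary[occurrence] = occurrence_repetitions(occurrence, concept_list)
--         paragraphs_occurrences_weigth_dictionary[paragraph] = occurrence_weight_dictionary
--     return paragraphs_occurrences_weigth_dictionary
--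
-- def occurrence_repetitions(occ, con_list):
--     counter = 0
--     for con in con_list:
--         if occ == con:
--             counter += 1
--     return counter
-- ===== SOURCE B (Python) =====
-- def _bump(pairs, c):
--     # increment the first (c, n) entry in place, or append (c, 1)
--     for i, kv in enumerate(pairs):
--         if kv[0] == c:
--             pairs[i] = (c, kv[1] + 1)
--             return
--     pairs.append((c, 1))
--
-- def get_paragraph_occurrences_weigth(paragraphs_occurrences):
--     result = {}
--     for paragraph, concept_list in paragraphs_occurrences.items():
--         pairs = []
--         for c in concept_list:
--             _bump(pairs, c)
--         result[paragraph] = dict(pairs)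
--     return result
-- ===== Notes on version B (the rewrite author's own statement) =====
-- stated objective: alternative
-- what changed: Replaces A's per-element full re-scan of the concept list (occurrence_repetitions called for every element) with a single forward pass that maintains an association list of (concept, count) pairs via a recursive first-match bump, converted to a dict at the end; first-appearance order is preserved.
import Mathlib
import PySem

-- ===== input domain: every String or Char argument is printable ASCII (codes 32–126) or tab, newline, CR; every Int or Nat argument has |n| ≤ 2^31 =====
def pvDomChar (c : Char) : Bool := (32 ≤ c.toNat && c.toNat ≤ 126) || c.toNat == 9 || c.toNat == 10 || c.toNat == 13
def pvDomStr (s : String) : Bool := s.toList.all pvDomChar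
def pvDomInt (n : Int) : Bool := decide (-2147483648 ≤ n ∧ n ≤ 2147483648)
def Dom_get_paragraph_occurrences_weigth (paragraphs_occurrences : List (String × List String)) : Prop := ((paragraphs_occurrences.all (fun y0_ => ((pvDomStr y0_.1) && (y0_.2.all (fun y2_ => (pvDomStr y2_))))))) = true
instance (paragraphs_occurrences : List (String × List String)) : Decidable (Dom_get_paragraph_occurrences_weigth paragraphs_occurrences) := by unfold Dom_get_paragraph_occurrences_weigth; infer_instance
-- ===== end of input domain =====

-- B replaces A's per-element full re-scan with a single pass maintaining an association list of (concept,count) pairs bumped by first match (same results, different algorithm).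


-- ===== PORT A =====
def occurrence_repetitions (occ : String) (con_list : List String) : Int :=
  con_list.foldl (fun counter con => if occ == con then counter + 1 else counter) 0

def get_paragraph_occurrences_weigth (paragraphs_occurrences : List (String × List String)) : List (String × List (String × Int)) :=
  (paragraphs_occurrences.foldl
    (fun acc p =>
      acc.insert p.1
        ((p.2.foldl
            (fun d occurrence => d.insert occurrence (occurrence_repetitions occurrence p.2))
            (PySem.Dict.empty : PySem.Dict String Int)).items))
    (PySem.Dict.empty : PySem.Dict String (List (String × Int)))).items

-- ===== PORT B =====
-- _bump: increment the first (c, n) entry, or append (c, 1)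
def pvBump : List (String × Int) → String → List (String × Int)
  | [], c => [(c, 1)]
  | (k, v) :: rest, c => if k == c then (c, v + 1) :: rest else (k, v) :: pvBump rest c

def get_paragraph_occurrences_weigth_alt (paragraphs_occurrences : List (String × List String)) : List (String × List (String × Int)) :=
  (paragraphs_occurrences.foldl
    (fun result p =>
      result.insert p.1 ((PySem.Dict.ofList (p.2.foldl pvBump ([] : List (String × Int)))).items))
    (PySem.Dict.empty : PySem.Dict String (List (String × Int)))).items

-- ===== PRECONDITION & SPEC =====
def Spec_get_paragraph_occurrences_weigth (paragraphs_occurrences : List (String × List String)) (out : List (String × List (String × Int))) : Prop := out = get_paragraph_occurrences_weigth_alt paragraphs_occurrences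
instance (paragraphs_occurrences : List (String × List String)) (out : List (String × List (String × Int))) : Decidable (Spec_get_paragraph_occurrences_weigth paragraphs_occurrences out) := by unfold Spec_get_paragraph_occurrences_weigth; infer_instance

-- ===== CLAIM (what is proved, stated in full; the proofs are below) =====
def Claim_equal_get_paragraph_occurrences_weigth : Prop := ∀ (paragraphs_occurrences : List (String × List String)), Dom_get_paragraph_occurrences_weigth paragraphs_occurrences → Spec_get_paragraph_occurrences_weigth paragraphs_occurrences (get_paragraph_occurrences_weigth paragraphs_occurrences)

-- ===== LEMMAS AND PROOFS =====

-- first-match lookup with default 0 (proof-only helper)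
def pvLookup0 : List (String × Int) → String → Int
  | [], _ => 0
  | (k, v) :: rest, c => if k == c then v else pvLookup0 rest c

lemma occrep_aux (occ : String) : ∀ (l : List String) (c : Int),
    l.foldl (fun counter con => if occ == con then counter + 1 else counter) c = c + l.count occ := by
  intro l
  induction l with
  | nil => intro c; simp
  | cons x l ih =>
    intro c
    simp only [List.foldl_cons, List.count_cons, ih]
    by_cases h : occ = x
    · simp [h]; ring
    · have h' : x ≠ occ := fun he => h he.symm
      simp [h, h']

lemma occrep_eq_count (occ : String) (l : List String) :
    occurrence_repetitions occ l = l.count occ := by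
  simpa [occurrence_repetitions] using occrep_aux occ l 0

lemma getD_foldl_insert_const (g : String → Int) :
    ∀ (l : List String) (d : PySem.Dict String Int) (k : String),
      (l.foldl (fun d x => d.insert x (g x)) d).getD k 0
        = if k ∈ l then g k else d.getD k 0 := by
  intro l
  induction l with
  | nil => intro d k; simp
  | cons x l ih =>
    intro d k
    simp only [List.foldl_cons, ih, PySem.Dict.getD_insert, List.mem_cons]
    by_cases h1 : k ∈ l
    · simp [h1]
    · by_cases h2 : k = x <;> simp [h1, h2]

-- A's inner dict, characterised: first occurrences in order, paired with their counts
lemma innerA_eq (l : List String) :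
    (l.foldl (fun d occurrence => d.insert occurrence (occurrence_repetitions occurrence l))
        (PySem.Dict.empty : PySem.Dict String Int)).items
      = (PySem.Set.ofList l).map (fun k => (k, (l.count k : Int))) := by
  have hnd : (l.foldl (fun d occurrence => d.insert occurrence (occurrence_repetitions occurrence l))
      (PySem.Dict.empty : PySem.Dict String Int)).keys.Nodup :=
    PySem.Dict.nodup_keys_foldl_insert l _ _ PySem.Dict.nodup_keys_empty
  rw [PySem.Dict.items_eq_map_keys _ hnd 0, PySem.Dict.keys_foldl_insert]
  simp only [PySem.Dict.keys_empty, PySem.Set.update_nil_left]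
  apply List.map_congr_left
  intro k hk
  have hkl : k ∈ l := (PySem.Set.mem_ofList l k).1 hk
  rw [getD_foldl_insert_const, if_pos hkl, occrep_eq_count]

-- bump facts
lemma map_fst_pvBump (acc : List (String × Int)) (c : String) :
    (pvBump acc c).map Prod.fst = PySem.Set.add (acc.map Prod.fst) c := by
  induction acc with
  | nil => simp [pvBump, PySem.Set.add]
  | cons p rest ih =>
    obtain ⟨k, v⟩ := p
    by_cases h : k = c
    · simp [pvBump, h]
    · simp [pvBump, h, ih, PySem.Set.add_eq_ite]
      by_cases h2 : c ∈ rest.map Prod.fst <;> simp [h2, Ne.symm h]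

lemma pvLookup0_pvBump_self (acc : List (String × Int)) (c : String) :
    pvLookup0 (pvBump acc c) c = pvLookup0 acc c + 1 := by
  induction acc with
  | nil => simp [pvBump, pvLookup0]
  | cons p rest ih =>
    obtain ⟨k, v⟩ := p
    by_cases h : k = c
    · simp [pvBump, h, pvLookup0]
    · simp [pvBump, h, pvLookup0, ih]

lemma pvLookup0_pvBump_of_ne (acc : List (String × Int)) (c k' : String) (hne : k' ≠ c) :
    pvLookup0 (pvBump acc c) k' = pvLookup0 acc k' := by
  induction acc with
  | nil => simp [pvBump, pvLookup0, Ne.symm hne]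
  | cons p rest ih =>
    obtain ⟨k, v⟩ := p
    by_cases h : k = c
    · subst h; simp [pvBump, pvLookup0, Ne.symm hne]
    · by_cases h2 : k = k'
      · subst h2; simp [pvBump, h, pvLookup0]
      · simp [pvBump, h, h2, pvLookup0, ih]

-- an assoc list with Nodup keys is its keys paired with their lookups
lemma assoc_eq_map_keys (acc : List (String × Int)) (hnd : (acc.map Prod.fst).Nodup) :
    acc = (acc.map Prod.fst).map (fun k => (k, pvLookup0 acc k)) := by
  induction acc with
  | nil => simp
  | cons p rest ih =>
    obtain ⟨k, v⟩ := p
    simp only [List.map_cons, List.nodup_cons] at hnd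
    simp only [List.map_cons, List.map_map]
    refine List.cons_eq_cons.mpr ⟨?_, ?_⟩
    · simp [pvLookup0]
    · have hcong : List.map ((fun k1 => (k1, pvLookup0 ((k, v) :: rest) k1)) ∘ Prod.fst) rest
          = List.map ((fun k1 => (k1, pvLookup0 rest k1)) ∘ Prod.fst) rest := by
        apply List.map_congr_left
        intro q hq
        have hqk : q.1 ≠ k := fun he => hnd.1 (he ▸ List.mem_map_of_mem hq)
        simp [pvLookup0, Ne.symm hqk]
      rw [hcong, ← List.map_map]
      exact ih hnd.2

-- the bump loop computes first occurrences paired with counts (generalised invariant)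
lemma foldl_pvBump (l : List String) :
    ∀ (acc : List (String × Int)), (acc.map Prod.fst).Nodup →
      l.foldl pvBump acc
        = (PySem.Set.update (acc.map Prod.fst) l).map
            (fun k => (k, pvLookup0 acc k + (l.count k : Int))) := by
  induction l with
  | nil =>
    intro acc hnd
    simp only [List.foldl_nil, List.count_nil, PySem.Set.update_nil]
    simpa using assoc_eq_map_keys acc hnd
  | cons c l ih =>
    intro acc hnd
    have hnd' : ((pvBump acc c).map Prod.fst).Nodup := by
      rw [map_fst_pvBump]; exact PySem.Set.nodup_add _ _ hnd
    rw [List.foldl_cons, ih _ hnd', map_fst_pvBump, PySem.Set.update_cons]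
    apply List.map_congr_left
    intro k hk
    by_cases h : k = c
    · subst h
      rw [pvLookup0_pvBump_self]
      simp
      ring
    · rw [pvLookup0_pvBump_of_ne _ _ _ h]
      have h' : ¬c = k := fun he => h he.symm
      simp [h']

-- dict(pairs) on an assoc list with unique keys keeps the list
lemma ofList_items_of_nodup (pairs : List (String × Int)) (h : (pairs.map Prod.fst).Nodup) :
    (PySem.Dict.ofList pairs).items = pairs := by
  have h2 : ∀ a ∈ pairs, (PySem.Dict.empty : PySem.Dict String Int).contains a.1 = false := by simp
  simpa using PySem.Dict.items_foldl_insert_fresh pairs Prod.fst Prod.snd PySem.Dict.empty h2 h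

-- B's inner value equals A's
lemma innerB_eq (l : List String) :
    (PySem.Dict.ofList (l.foldl pvBump ([] : List (String × Int)))).items
      = (PySem.Set.ofList l).map (fun k => (k, (l.count k : Int))) := by
  have h : l.foldl pvBump ([] : List (String × Int))
      = (PySem.Set.ofList l).map (fun k => (k, (l.count k : Int))) := by
    simpa [pvLookup0, PySem.Set.update_nil_left] using foldl_pvBump l [] (by simp)
  rw [h]
  apply ofList_items_of_nodup
  have hn := PySem.Set.nodup_ofList (α := String) l
  simp only [List.map_map]
  have hid : (Prod.fst ∘ fun k => ((k : String), ((l.count k : Nat) : Int))) = id := rfl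
  rw [hid, List.map_id]
  exact hn

lemma outer_fun_eq :
    (fun (acc : PySem.Dict String (List (String × Int))) (p : String × List String) =>
      acc.insert p.1
        ((p.2.foldl
            (fun d occurrence => d.insert occurrence (occurrence_repetitions occurrence p.2))
            (PySem.Dict.empty : PySem.Dict String Int)).items))
    = (fun result p =>
      result.insert p.1 ((PySem.Dict.ofList (p.2.foldl pvBump ([] : List (String × Int)))).items)) := by
  funext acc p
  rw [innerA_eq, innerB_eq]

-- ===== VERDICT (by name: the statement is the Claim_ definition above) =====
theorem get_paragraph_occurrences_weigth_spec : Claim_equal_get_paragraph_occurrences_weigth := by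
  intro po _
  unfold Spec_get_paragraph_occurrences_weigth get_paragraph_occurrences_weigth get_paragraph_occurrences_weigth_alt
  rw [outer_fun_eq]
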